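-- pv_equiv track=rewrite | github.com/annafrei924/Anagrams | Final.py | validKey
-- ===== SOURCE A (Python) =====
-- def validKey(shufStartWord, guess, key):
--     guesskey = guess + key
--     counter = 0
--
--     #tally startWord
--     startWordTally = {}
--     for letter in shufStartWord:
--         if letter in startWordTally: startWordTally[letter] += 1
--         else: startWordTally[letter]= 1
--
--     #tally guess word
--     guessTally = {}
--     for letter in guesskey:
--         if letter in guessTally: guessTally[letter] += 1
--         else: guessTally[letter]= 1
--
--     #loops through guess again & if the letter is valid, add to counter
--     for char in guesskey:
--         if char in shufStartWord and guessTally[char] <= startWordTally[char]: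
--             counter += 1
--         #if every letter is valid, returns True
--         if counter == len(guesskey): return True
-- ===== SOURCE B (Python) =====
-- def validKey(shufStartWord, guess, key):
--     # Sort both strings; guess+key is a sub-multiset of shufStartWord iff its
--     # sorted form is a subsequence of the sorted start word (greedy merge scan).
--     need = sorted(guess + key)
--     have = sorted(shufStartWord)
--     i = 0
--     for ch in have:
--         if i < len(need) and need[i] == ch:
--             i += 1
--     if need and i == len(need):
--         return True
-- ===== Notes on version B (the rewrite author's own statement) =====
-- stated objective: alternative
-- what changed: Replaces A's two hand-built tally dicts and the early-return position-counter loop by sorting both strings and running a greedy two-pointer merge scan (sorted(guess+key) must be a subsequence of sorted(shufStartWord)), keeping the empty-guess None and None-on-failure behaviour.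
import Mathlib
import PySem

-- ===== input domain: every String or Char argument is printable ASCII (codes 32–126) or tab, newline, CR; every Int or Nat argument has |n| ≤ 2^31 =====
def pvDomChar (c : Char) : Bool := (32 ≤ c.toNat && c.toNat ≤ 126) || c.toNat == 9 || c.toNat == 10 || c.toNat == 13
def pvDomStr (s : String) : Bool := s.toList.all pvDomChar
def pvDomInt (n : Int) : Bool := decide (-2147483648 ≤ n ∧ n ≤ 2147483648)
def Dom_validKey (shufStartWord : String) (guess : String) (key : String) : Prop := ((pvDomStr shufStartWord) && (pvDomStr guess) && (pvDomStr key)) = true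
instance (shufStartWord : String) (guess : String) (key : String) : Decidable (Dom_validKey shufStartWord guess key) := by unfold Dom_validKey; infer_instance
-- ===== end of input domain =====

-- B replaces A's two hand-built tally dicts and the early-return counter loop by sorting both
-- strings and a greedy two-pointer subsequence scan (objective: alternative); same return value.

-- ===== PORT A =====
-- tally loop: 'if letter in tally: tally[letter] += 1 else: tally[letter] = 1'
def validKeyTally (l : List Char) : PySem.Dict Char Int :=
  l.foldl (fun d c => if d.contains c then d.insert c (d.getD c 0 + 1) else d.insert c 1)
    PySem.Dict.empty

-- third loop, with the early 'return True' when counter == len(guesskey)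
def validKeyLoop (sw : List Char) (gT sT : PySem.Dict Char Int) (n : Int) :
    List Char → Int → Option Bool
  | [], _ => none
  | c :: rest, counter =>
      let counter' :=
        if PySem.Chars.isIn [c] sw ∧ gT.getD c 0 ≤ sT.getD c 0 then counter + 1 else counter
      if counter' = n then some true else validKeyLoop sw gT sT n rest counter'

def validKey (shufStartWord : String) (guess : String) (key : String) : Option Bool :=
  let guesskey := guess.toList ++ key.toList
  let startWordTally := validKeyTally shufStartWord.toList
  let guessTally := validKeyTally guesskey
  validKeyLoop shufStartWord.toList guessTally startWordTally (guesskey.length : Int) guesskey 0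

-- ===== PORT B =====
def validKey_alt (shufStartWord : String) (guess : String) (key : String) : Option Bool :=
  let need := PySem.List.sorted (guess.toList ++ key.toList) (fun c => c) false
  let hv := PySem.List.sorted shufStartWord.toList (fun c => c) false
  let i := hv.foldl (fun i ch =>
      if i < (need.length : Int) ∧ PySem.List.pyGet? need i = some ch then i + 1 else i) 0
  if need ≠ [] ∧ i = (need.length : Int) then some true else none

-- ===== PRECONDITION & SPEC =====
def Spec_validKey (shufStartWord : String) (guess : String) (key : String) (out : Option Bool) : Prop := out = validKey_alt shufStartWord guess key
instance (shufStartWord : String) (guess : String) (key : String) (out : Option Bool) : Decidable (Spec_validKey shufStartWord guess key out) := by unfold Spec_validKey; infer_instance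

-- ===== CLAIM (what is proved, stated in full; the proofs are below) =====
def Claim_equal_validKey : Prop := ∀ (shufStartWord : String) (guess : String) (key : String), Dom_validKey shufStartWord guess key → Spec_validKey shufStartWord guess key (validKey shufStartWord guess key)

-- ===== LEMMAS AND PROOFS =====

-- A's tally dict returns the character count.
theorem validKeyTally_getD (l : List Char) (c : Char) :
    (validKeyTally l).getD c 0 = (l.count c : Int) := by
  have hstep : l.foldl (fun d x => if d.contains x then d.insert x (d.getD x 0 + 1) else d.insert x 1)
      (PySem.Dict.empty : PySem.Dict Char Int)
      = l.foldl (fun d x => d.insert x (d.getD x 0 + 1)) PySem.Dict.empty := by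
    apply PySem.List.foldl_congr_mem
    intro d x _
    by_cases h : d.contains x
    · simp [h]
    · have hnone : d.get? x = none := by
        rw [PySem.Dict.get?_eq_none_iff_contains]
        simpa using h
      have : d.getD x 0 = 0 := by simp [PySem.Dict.getD, hnone]
      simp [h, this]
  unfold validKeyTally
  rw [hstep, PySem.Dict.getD_foldl_insert_add_one]
  simp

-- characterisation of A's third loop
theorem validKeyLoop_spec (sw : List Char) (gT sT : PySem.Dict Char Int) (n : Int) :
    ∀ (rest : List Char) (counter : Int), counter + rest.length ≤ n →
    validKeyLoop sw gT sT n rest counter =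
      (if rest ≠ [] ∧ counter + rest.length = n ∧
          (∀ c ∈ rest, PySem.Chars.isIn [c] sw ∧ gT.getD c 0 ≤ sT.getD c 0)
       then some true else none) := by
  intro rest
  induction rest with
  | nil => intro counter _; simp [validKeyLoop]
  | cons c t ih =>
      intro counter h
      simp only [List.length_cons] at h
      push_cast at h
      simp only [validKeyLoop]
      by_cases hP : PySem.Chars.isIn [c] sw ∧ gT.getD c 0 ≤ sT.getD c 0
      · simp only [if_pos hP]
        by_cases he : counter + 1 = n
        · have ht : t = [] := by
            have h0 : (t.length : Int) ≤ 0 := by omega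
            have : t.length = 0 := by exact_mod_cast le_antisymm h0 (by positivity)
            exact List.eq_nil_of_length_eq_zero this
          subst ht
          rw [if_pos he, if_pos]
          refine ⟨by simp, by simpa using he, ?_⟩
          intro x hx
          rcases List.mem_singleton.mp hx with rfl
          exact hP
        · rw [if_neg he, ih (counter + 1) (by omega)]
          by_cases ht : t = []
          · subst ht
            rw [if_neg (by simp), if_neg]
            rintro ⟨-, h2, -⟩
            simp at h2
            omega
          · have hiff : (t ≠ [] ∧ counter + 1 + (t.length : Int) = n ∧
                (∀ x ∈ t, PySem.Chars.isIn [x] sw ∧ gT.getD x 0 ≤ sT.getD x 0))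
              ↔ (c :: t ≠ [] ∧ counter + ((c :: t).length : Int) = n ∧
                (∀ x ∈ c :: t, PySem.Chars.isIn [x] sw ∧ gT.getD x 0 ≤ sT.getD x 0)) := by
              simp only [List.forall_mem_cons, List.length_cons, ht, ne_eq,
                not_false_eq_true, true_and, List.cons_ne_nil]
              push_cast
              constructor
              · rintro ⟨h1, h2⟩; exact ⟨by omega, hP, h2⟩
              · rintro ⟨h1, -, h2⟩; exact ⟨by omega, h2⟩
            rw [if_congr hiff rfl rfl]
      · simp only [if_neg hP]
        have he : counter ≠ n := by omega
        rw [if_neg he, ih counter (by omega)]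
        rw [if_neg, if_neg]
        · rintro ⟨-, -, hall⟩
          exact hP (hall c List.mem_cons_self)
        · rintro ⟨ht, h2, -⟩
          have := List.length_pos_of_ne_nil ht
          omega

-- spec of B's greedy scan, as recursion on both lists
def pvGreedy : List Char → List Char → Nat
  | [], _ => 0
  | _ :: _, [] => 0
  | n :: ns, h :: hs => if n = h then pvGreedy ns hs + 1 else pvGreedy (n :: ns) hs

-- B's foldl state i equals the starting index plus the greedy match length of the rest
theorem validKeyScan_eq (need : List Char) :
    ∀ (hv : List Char) (i : Nat), i ≤ need.length →
    hv.foldl (fun i ch =>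
        if i < (need.length : Int) ∧ PySem.List.pyGet? need i = some ch then i + 1 else i)
      (i : Int)
    = ((i + pvGreedy (need.drop i) hv : Nat) : Int) := by
  intro hv
  induction hv with
  | nil => intro i _; cases hd : need.drop i <;> simp [pvGreedy]
  | cons ch rest ih =>
      intro i hi
      simp only [List.foldl_cons]
      rcases lt_or_eq_of_le hi with hlt | heq
      · have hdrop : need.drop i = need[i] :: need.drop (i + 1) :=
          List.drop_eq_getElem_cons hlt
        have hget : PySem.List.pyGet? need (i : Int) = some need[i] := by
          rw [PySem.List.pyGet?_natCast]
          exact List.getElem?_eq_getElem hlt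
        by_cases he : need[i] = ch
        · have hcond : ((i : Int) < (need.length : Int) ∧
              PySem.List.pyGet? need (i : Int) = some ch) := by
            exact ⟨by exact_mod_cast hlt, by rw [hget, he]⟩
          rw [if_pos hcond]
          have : ((i : Int) + 1) = ((i + 1 : Nat) : Int) := by push_cast; ring
          rw [this, ih (i + 1) hlt]
          rw [hdrop]
          simp only [pvGreedy, if_pos he]
          push_cast
          ring
        · have hcond : ¬ ((i : Int) < (need.length : Int) ∧
              PySem.List.pyGet? need (i : Int) = some ch) := by
            rintro ⟨-, hc⟩
            rw [hget] at hc
            exact he (Option.some_injective _ hc)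
          rw [if_neg hcond, ih i hi, hdrop]
          simp only [pvGreedy, if_neg he]
      · have hcond : ¬ ((i : Int) < (need.length : Int) ∧
            PySem.List.pyGet? need (i : Int) = some ch) := by
          rintro ⟨hc, -⟩
          subst heq
          exact absurd hc (by exact_mod_cast lt_irrefl _)
        have hd : need.drop i = [] := by subst heq; simp
        rw [if_neg hcond, ih i hi, hd]
        simp [pvGreedy]

theorem pvGreedy_eq_length_iff (ns hs : List Char) :
    pvGreedy ns hs = ns.length ↔ ns.Sublist hs := by
  induction hs generalizing ns with
  | nil =>
      cases ns with
      | nil => simp [pvGreedy]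
      | cons n ns' => simp [pvGreedy]
  | cons h hs ih =>
      cases ns with
      | nil => simp [pvGreedy]
      | cons n ns' =>
          simp only [pvGreedy]
          by_cases he : n = h
          · subst he
            rw [if_pos rfl]
            simp only [List.length_cons, Nat.add_right_cancel_iff, List.cons_sublist_cons]
            exact ih ns'
          · rw [if_neg he, ih (n :: ns')]
            constructor
            · exact fun hs' => hs'.cons h
            · intro hsub
              cases hsub with
              | cons _ h' => exact h'
              | cons₂ => exact absurd rfl he

-- ===== VERDICT (by name: the statement is the Claim_ definition above) =====
theorem pairwise_le_sorted (xs : List Char) :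
    (PySem.List.sorted xs (fun c => c) false).Pairwise (· ≤ ·) := by
  simpa using PySem.List.sorted_pairwise (xs := xs) (key := fun c => c)

theorem validKey_spec : Claim_equal_validKey := by
  intro s g k _
  unfold Spec_validKey
  simp only [validKey, validKey_alt]
  set gk := g.toList ++ k.toList with hgk
  set sw := s.toList with hsw
  set need := PySem.List.sorted gk (fun c => c) false with hneed
  set hv := PySem.List.sorted sw (fun c => c) false with hhv
  have hpermN : need.Perm gk := PySem.List.sorted_perm ..
  have hpermH : hv.Perm sw := PySem.List.sorted_perm ..
  rw [validKeyLoop_spec _ _ _ _ gk 0 (by simp)]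
  have hscan := validKeyScan_eq need hv 0 (Nat.zero_le _)
  simp only [Nat.cast_zero, List.drop_zero, Nat.zero_add] at hscan
  rw [hscan]
  have key : (gk ≠ [] ∧ (0 : Int) + gk.length = gk.length ∧
      (∀ c ∈ gk, PySem.Chars.isIn [c] sw ∧
        (validKeyTally gk).getD c 0 ≤ (validKeyTally sw).getD c 0))
    ↔ (need ≠ [] ∧ ((pvGreedy need hv : Nat) : Int) = (need.length : Int)) := by
    constructor
    · rintro ⟨h0, -, h1⟩
      have hsub : need.Sublist hv := by
        refine List.sublist_of_subperm_of_pairwise ?_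
          (pairwise_le_sorted gk) (pairwise_le_sorted sw)
        rw [List.subperm_ext_iff]
        intro c hc
        have hcgk : c ∈ gk := hpermN.mem_iff.mp hc
        have h2 := (h1 c hcgk).2
        rw [validKeyTally_getD, validKeyTally_getD] at h2
        have h3 : gk.count c ≤ sw.count c := by exact_mod_cast h2
        rwa [hpermN.count_eq, hpermH.count_eq]
      refine ⟨?_, ?_⟩
      · intro hn
        exact h0 (by simpa [hneed, PySem.List.sorted_eq_nil_iff] using hn)
      · exact_mod_cast (pvGreedy_eq_length_iff need hv).mpr hsub
    · rintro ⟨h0, h1⟩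
      have hsub : need.Sublist hv := (pvGreedy_eq_length_iff need hv).mp (by exact_mod_cast h1)
      have hcnt : ∀ c, gk.count c ≤ sw.count c := fun c => by
        rw [← hpermN.count_eq, ← hpermH.count_eq]
        exact hsub.count_le c
      have h0' : gk ≠ [] := by
        intro hn
        exact h0 (by simp [hneed, hn, PySem.List.sorted_eq_nil_iff])
      refine ⟨h0', by simp, fun c hc => ?_⟩
      constructor
      · have hmem : c ∈ sw :=
          List.one_le_count_iff.mp (le_trans (List.one_le_count_iff.mpr hc) (hcnt c))
        exact (PySem.Chars.isIn_iff_infix _ _).mpr ((List.singleton_infix_iff c _).mpr hmem)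
      · rw [validKeyTally_getD, validKeyTally_getD]
        exact_mod_cast hcnt c
  rw [if_congr key rfl rfl]
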